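-- pv_equiv track=rewrite | github.com/Minorli/pa_comparator | db_comparator_fixup_release.py | build_schema_mapping
-- ===== SOURCE A (Python) =====
-- from typing import Dict, Set, List, Tuple, Optional, NamedTuple, Callable
--
-- MasterCheckList = List[Tuple[str, str, str]]  # [(src_name, tgt_name, type)]
--
-- def build_schema_mapping(master_list: MasterCheckList) -> Dict[str, str]:
--     """
--     基于 master_list 中 TABLE 映射，推导 schema 映射：
--       如果同一 src_schema 只映射到唯一一个 tgt_schema，则使用该映射；
--       否则 (映射到多个目标 schema)，退回 src_schema 本身 (1:1)。
--     """
--     mapping_tmp: Dict[str, Set[str]] = {}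
--     for src_name, tgt_name, obj_type in master_list:
--         if obj_type.upper() != 'TABLE':
--             continue
--         try:
--             src_schema, _ = src_name.split('.')
--             tgt_schema, _ = tgt_name.split('.')
--         except ValueError:
--             continue
--         mapping_tmp.setdefault(src_schema.upper(), set()).add(tgt_schema.upper())
--
--     final_mapping: Dict[str, str] = {}
--     for src_schema, tgt_set in mapping_tmp.items():
--         if len(tgt_set) == 1:
--             final_mapping[src_schema] = next(iter(tgt_set))
--         else:
--             final_mapping[src_schema] = src_schema
--     return final_mapping
-- ===== SOURCE B (Python) =====
-- def build_schema_mapping(master_list):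
--     """One pass: decide each schema's target on the fly; a conflict is sticky
--     (once two different targets were seen, the schema maps to itself)."""
--     final_mapping = {}
--     conflicted = set()
--     for src_name, tgt_name, obj_type in master_list:
--         if obj_type.upper() != 'TABLE':
--             continue
--         src_parts = src_name.split('.')
--         tgt_parts = tgt_name.split('.')
--         if len(src_parts) != 2 or len(tgt_parts) != 2:
--             continue
--         src_schema = src_parts[0].upper()
--         tgt_schema = tgt_parts[0].upper()
--         if src_schema not in final_mapping:
--             final_mapping[src_schema] = tgt_schema
--         elif src_schema not in conflicted and final_mapping[src_schema] != tgt_schema: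
--             conflicted.add(src_schema)
--             final_mapping[src_schema] = src_schema
--     return final_mapping
-- ===== Notes on version B (the rewrite author's own statement) =====
-- stated objective: simpler
-- what changed: A builds a per-schema set of all targets and collapses it in a second pass; B decides each schema's mapping on the fly in a single pass, keeping only the final mapping plus a sticky set of conflicted schemas and never materialising the target sets.
import Mathlib
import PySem

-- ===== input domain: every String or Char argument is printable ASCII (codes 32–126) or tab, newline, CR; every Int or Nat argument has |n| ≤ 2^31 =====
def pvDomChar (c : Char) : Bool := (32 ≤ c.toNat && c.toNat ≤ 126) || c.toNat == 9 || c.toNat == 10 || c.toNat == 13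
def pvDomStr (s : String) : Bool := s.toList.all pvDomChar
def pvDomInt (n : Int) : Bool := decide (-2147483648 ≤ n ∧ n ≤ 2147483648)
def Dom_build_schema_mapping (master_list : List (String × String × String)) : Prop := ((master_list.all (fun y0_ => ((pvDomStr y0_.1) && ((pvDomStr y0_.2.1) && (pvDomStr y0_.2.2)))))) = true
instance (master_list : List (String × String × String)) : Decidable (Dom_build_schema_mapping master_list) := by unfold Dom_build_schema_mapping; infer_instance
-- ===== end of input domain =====

-- B replaces A's two-phase "collect the set of targets per schema, then collapse" by a single
-- decide-on-the-fly pass keeping the final mapping plus a sticky set of conflicted schemas (objective: simpler).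

-- ===== PORT A =====
-- loop body of A's first for-loop: obj_type filter, the two '.'-splits (a pattern other than
-- exactly two pieces is Python's ValueError → continue), then setdefault(...,set()).add(...)
def stepA (d : PySem.Dict String (PySem.Set String)) (row : String × String × String) :
    PySem.Dict String (PySem.Set String) :=
  if PySem.Str.upper row.2.2 ≠ "TABLE" then d
  else
    match PySem.Str.split? row.1 ".", PySem.Str.split? row.2.1 "." with
    | some [src_schema, _], some [tgt_schema, _] =>
        d.insert (PySem.Str.upper src_schema)
          (PySem.Set.add (d.getD (PySem.Str.upper src_schema) PySem.Set.empty)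
            (PySem.Str.upper tgt_schema))
    | _, _ => d

def build_schema_mapping (master_list : List (String × String × String)) : List (String × String) :=
  let mapping_tmp := master_list.foldl stepA PySem.Dict.empty
  -- second loop: len(tgt_set)==1 → its unique element (next(iter(...)) on a 1-element set), else src_schema
  (mapping_tmp.items.foldl
    (fun fm p =>
      if PySem.Set.len p.2 == 1 then fm.insert p.1 (p.2.headD "")
      else fm.insert p.1 p.1)
    (PySem.Dict.empty : PySem.Dict String String)).items

-- ===== PORT B =====
-- loop body of B: same filter and splits; then decide on the fly.
-- (final_mapping[src_schema] is read via getD with an arbitrary default: the branch is guarded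
--  by 'src_schema in final_mapping', so the key is present and the default is never used.)
def stepB (st : PySem.Dict String String × PySem.Set String) (row : String × String × String) :
    PySem.Dict String String × PySem.Set String :=
  if PySem.Str.upper row.2.2 ≠ "TABLE" then st
  else
    match PySem.Str.split? row.1 ".", PySem.Str.split? row.2.1 "." with
    | some [sp0, _], some [tp0, _] =>
        let src_schema := PySem.Str.upper sp0
        let tgt_schema := PySem.Str.upper tp0
        if ¬ st.1.contains src_schema then (st.1.insert src_schema tgt_schema, st.2)
        else if ¬ PySem.Set.contains st.2 src_schema ∧ st.1.getD src_schema "" ≠ tgt_schema then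
          (st.1.insert src_schema src_schema, PySem.Set.add st.2 src_schema)
        else st
    | _, _ => st

def build_schema_mapping_alt (master_list : List (String × String × String)) : List (String × String) :=
  (master_list.foldl stepB ((PySem.Dict.empty : PySem.Dict String String), PySem.Set.empty)).1.items

-- ===== PRECONDITION & SPEC =====
def Spec_build_schema_mapping (master_list : List (String × String × String)) (out : List (String × String)) : Prop := out = build_schema_mapping_alt master_list
instance (master_list : List (String × String × String)) (out : List (String × String)) : Decidable (Spec_build_schema_mapping master_list out) := by unfold Spec_build_schema_mapping; infer_instance

-- ===== CLAIM (what is proved, stated in full; the proofs are below) =====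
def Claim_equal_build_schema_mapping : Prop := ∀ (master_list : List (String × String × String)), Dom_build_schema_mapping master_list → Spec_build_schema_mapping master_list (build_schema_mapping master_list)

-- ===== LEMMAS AND PROOFS =====

-- the per-row event both loops react to: none = the row is skipped
def rowEvent (row : String × String × String) : Option (String × String) :=
  if PySem.Str.upper row.2.2 ≠ "TABLE" then none
  else
    match PySem.Str.split? row.1 ".", PySem.Str.split? row.2.1 "." with
    | some [src_schema, _], some [tgt_schema, _] =>
        some (PySem.Str.upper src_schema, PySem.Str.upper tgt_schema)
    | _, _ => none

theorem stepA_event (d : PySem.Dict String (PySem.Set String)) (row : String × String × String) :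
    stepA d row = match rowEvent row with
      | none => d
      | some (k, t) => d.insert k (PySem.Set.add (d.getD k PySem.Set.empty) t) := by
  unfold stepA rowEvent
  split
  · rfl
  · split <;> rfl

theorem stepB_event (st : PySem.Dict String String × PySem.Set String) (row : String × String × String) :
    stepB st row = match rowEvent row with
      | none => st
      | some (k, t) =>
        if ¬ st.1.contains k then (st.1.insert k t, st.2)
        else if ¬ PySem.Set.contains st.2 k ∧ st.1.getD k "" ≠ t then
          (st.1.insert k k, PySem.Set.add st.2 k)
        else st := by
  unfold stepB rowEvent
  split
  · rfl
  · split <;> rfl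

-- collapse of one (schema, target-set) entry, as A's second loop computes it
def cval (p : String × PySem.Set String) : String × String :=
  (p.1, if PySem.Set.len p.2 == 1 then p.2.headD "" else p.1)

theorem cval_fst (p : String × PySem.Set String) : (cval p).1 = p.1 := rfl

theorem cval_singleton (k t : String) : cval (k, [t]) = (k, t) := by
  simp [cval, PySem.Set.len]

theorem cval_of_two_le (k : String) (v : PySem.Set String) (h : 2 ≤ v.length) :
    cval (k, v) = (k, k) := by
  have hc : (PySem.Set.len v == (1 : Int)) = false := by
    simp [PySem.Set.len]; omega
  simp only [cval, hc, Bool.false_eq_true, if_false]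

theorem length_le_add (s : PySem.Set String) (t : String) :
    s.length ≤ (PySem.Set.add s t).length := by
  simp only [PySem.Set.add]; split <;> simp

theorem keys_of_items_map (fm : PySem.Dict String String)
    (d : PySem.Dict String (PySem.Set String)) (h : fm.items = d.items.map cval) :
    fm.keys = d.keys := by
  simp only [PySem.Dict.keys, h, List.map_map]
  rfl

-- a key that is present holds a value stored in the items list
theorem getD_mem_items_of_contains (d : PySem.Dict String (PySem.Set String))
    (k : String) (h : d.contains k = true) :
    (k, d.getD k PySem.Set.empty) ∈ d.items := by
  rw [PySem.Dict.contains_eq_isSome_get?] at h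
  obtain ⟨v, hv⟩ := Option.isSome_iff_exists.mp h
  rw [PySem.Dict.getD_eq_get?_getD, hv]
  exact PySem.Dict.mem_items_of_get?_eq_some d hv

-- the simulation invariant between A's first-phase dict and B's state
def SimRel (d : PySem.Dict String (PySem.Set String))
    (st : PySem.Dict String String × PySem.Set String) : Prop :=
  d.keys.Nodup ∧
  st.1.items = d.items.map cval ∧
  (∀ x : String, PySem.Set.contains st.2 x = decide (2 ≤ (d.getD x PySem.Set.empty).length)) ∧
  (∀ p ∈ d.items, p.2 ≠ ([] : PySem.Set String))

theorem contains_add_self (s : PySem.Set String) (k : String) :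
    PySem.Set.contains (PySem.Set.add s k) k = true := by
  simp [PySem.Set.add, PySem.Set.contains]
  split <;> simp_all

theorem contains_add_of_ne (s : PySem.Set String) (k x : String) (hx : x ≠ k) :
    PySem.Set.contains (PySem.Set.add s k) x = PySem.Set.contains s x := by
  simp only [PySem.Set.add, PySem.Set.contains]
  split
  · rfl
  · simp [hx]

theorem SimRel_step (d : PySem.Dict String (PySem.Set String))
    (st : PySem.Dict String String × PySem.Set String) (row : String × String × String)
    (h : SimRel d st) : SimRel (stepA d row) (stepB st row) := by
  obtain ⟨hnd, hfm, hconf, hne⟩ := h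
  rw [stepA_event, stepB_event]
  cases hev : rowEvent row with
  | none => exact ⟨hnd, hfm, hconf, hne⟩
  | some kt =>
  obtain ⟨k, t⟩ := kt
  show SimRel (d.insert k ((d.getD k PySem.Set.empty).add t))
    (if ¬st.1.contains k = true then (st.1.insert k t, st.2)
     else if ¬st.2.contains k = true ∧ st.1.getD k "" ≠ t then (st.1.insert k k, st.2.add k)
     else st)
  have hkeys : st.1.keys = d.keys := keys_of_items_map _ _ hfm
  have hcc : st.1.contains k = d.contains k := by
    rw [PySem.Dict.contains_eq_decide_mem_keys, PySem.Dict.contains_eq_decide_mem_keys, hkeys]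
  by_cases hc : d.contains k = true
  · -- k already present in A's dict
    have hmem : (k, d.getD k PySem.Set.empty) ∈ d.items := getD_mem_items_of_contains d k hc
    have hsne : d.getD k PySem.Set.empty ≠ [] := hne _ hmem
    rw [if_neg (by simp [hcc, hc])]
    by_cases hcs : PySem.Set.contains st.2 k = true
    · -- k already conflicted: both sides keep the collapsed value k
      have h2 : 2 ≤ (d.getD k PySem.Set.empty).length := by
        have := hconf k
        rw [hcs] at this
        exact of_decide_eq_true this.symm
      have h2' : 2 ≤ (PySem.Set.add (d.getD k PySem.Set.empty) t).length :=
        le_trans h2 (length_le_add _ t)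
      rw [if_neg (fun hcond => hcond.1 hcs)]
      refine ⟨PySem.Dict.nodup_keys_insert d k _ hnd, ?_, ?_, ?_⟩
      · rw [PySem.Dict.items_insert_of_contains d _ hc, List.map_map, hfm]
        refine (List.map_congr_left ?_).symm
        intro p hp
        by_cases hpk : p.1 = k
        · have hp2 : d.getD k PySem.Set.empty = p.2 := by
            refine PySem.Dict.getD_of_mem_items d ?_ hnd PySem.Set.empty
            rw [← hpk]; exact hp
          have hps : p = (k, d.getD k PySem.Set.empty) := by
            rw [hp2, ← hpk]
          rw [hps]
          simp only [Function.comp, beq_self_eq_true, if_true]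
          rw [cval_of_two_le _ _ h2', cval_of_two_le _ _ h2]
        · simp only [Function.comp]
          rw [if_neg (by simpa using hpk)]
      · intro x
        rw [PySem.Dict.getD_insert]
        by_cases hx : x = k
        · rw [if_pos hx, hx, hcs]
          exact (decide_eq_true h2').symm
        · rw [if_neg hx]; exact hconf x
      · intro p hp
        rw [PySem.Dict.mem_items_insert] at hp
        rcases hp with h1 | ⟨h1, -⟩
        · rw [h1]
          intro hnil
          replace hnil : (d.getD k PySem.Set.empty).add t = [] := hnil
          rw [hnil] at h2'
          simp at h2'
        · exact hne _ h1
    · -- k present, not conflicted: its target set is a singleton [u]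
      have hcs' : PySem.Set.contains st.2 k = false := by simpa using hcs
      have hlt : ¬ 2 ≤ (d.getD k PySem.Set.empty).length := by
        have := hconf k
        rw [hcs'] at this
        exact of_decide_eq_false this.symm
      have hlen1 : (d.getD k PySem.Set.empty).length = 1 := by
        have : (d.getD k PySem.Set.empty).length ≠ 0 := by
          simpa [List.length_eq_zero_iff] using hsne
        omega
      obtain ⟨u, hsu⟩ := List.length_eq_one_iff.mp hlen1
      have hmemfm : (k, u) ∈ st.1.items := by
        rw [hfm]
        exact List.mem_map.mpr ⟨_, hmem, by rw [hsu]; exact cval_singleton k u⟩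
      have hgd : st.1.getD k "" = u :=
        PySem.Dict.getD_of_mem_items st.1 hmemfm (by rw [hkeys]; exact hnd) ""
      by_cases hut : u = t
      · -- the single known target seen again: both states unchanged
        have haddeq : PySem.Set.add (d.getD k PySem.Set.empty) t = d.getD k PySem.Set.empty := by
          rw [hsu, hut]
          simp [PySem.Set.add]
        have hdeq : d.insert k (PySem.Set.add (d.getD k PySem.Set.empty) t) = d := by
          apply PySem.Dict.ext
          rw [PySem.Dict.items_insert_of_contains d _ hc, haddeq]
          have : ∀ p ∈ d.items,
              (if (p.1 == k) = true then (k, d.getD k PySem.Set.empty) else p) = p := by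
            intro p hp
            by_cases hpk : p.1 = k
            · rw [if_pos (by simpa using hpk)]
              have hp2 : d.getD k PySem.Set.empty = p.2 := by
                refine PySem.Dict.getD_of_mem_items d ?_ hnd PySem.Set.empty
                rw [← hpk]; exact hp
              rw [hp2, ← hpk]
            · rw [if_neg (by simpa using hpk)]
          rw [List.map_congr_left this]
          simp
        rw [if_neg (by rw [hgd, hut]; simp), hdeq]
        exact ⟨hnd, hfm, hconf, hne⟩
      · -- a second, different target: conflict discovered now
        have haddlist : PySem.Set.add (d.getD k PySem.Set.empty) t = [u, t] := by
          rw [hsu]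
          simp [PySem.Set.add, Ne.symm hut]
        rw [if_pos ⟨by rw [hcs']; exact Bool.false_ne_true, by rw [hgd]; simpa using hut⟩]
        refine ⟨PySem.Dict.nodup_keys_insert d k _ hnd, ?_, ?_, ?_⟩
        · rw [PySem.Dict.items_insert_of_contains st.1 _ (by rw [hcc]; exact hc), hfm,
            PySem.Dict.items_insert_of_contains d _ hc, List.map_map, List.map_map]
          refine List.map_congr_left ?_
          intro p hp
          by_cases hpk : p.1 = k
          · simp only [Function.comp]
            rw [if_pos (by simpa [cval_fst] using hpk), if_pos (by simpa using hpk),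
              haddlist, cval_of_two_le _ _ (by simp)]
          · simp only [Function.comp]
            rw [if_neg (by simpa [cval_fst] using hpk), if_neg (by simpa using hpk)]
        · intro x
          rw [PySem.Dict.getD_insert]
          by_cases hx : x = k
          · rw [if_pos hx, hx, contains_add_self, haddlist]
            simp
          · rw [if_neg hx, contains_add_of_ne st.2 k x hx]
            exact hconf x
        · intro p hp
          rw [PySem.Dict.mem_items_insert] at hp
          rcases hp with h1 | ⟨h1, -⟩
          · rw [h1, haddlist]; simp
          · exact hne _ h1
  · -- fresh key: both sides append a new entry
    have hc' : d.contains k = false := by simpa using hc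
    have hadd : PySem.Set.add (d.getD k PySem.Set.empty) t = [t] := by
      rw [PySem.Dict.getD_of_not_contains d _ hc']
      rfl
    rw [if_pos (by simp [hcc, hc']), hadd]
    refine ⟨PySem.Dict.nodup_keys_insert d k _ hnd, ?_, ?_, ?_⟩
    · rw [PySem.Dict.items_insert_of_not_contains st.1 _ (by rw [hcc]; exact hc'), hfm,
        PySem.Dict.items_insert_of_not_contains d _ hc', List.map_append]
      simp [cval_singleton]
    · intro x
      rw [PySem.Dict.getD_insert]
      by_cases hx : x = k
      · rw [if_pos hx, hx]
        have : PySem.Set.contains st.2 k = false := by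
          rw [hconf k, PySem.Dict.getD_of_not_contains d _ hc']
          simp [PySem.Set.empty]
        rw [this]
        simp
      · rw [if_neg hx]; exact hconf x
    · intro p hp
      rw [PySem.Dict.mem_items_insert] at hp
      rcases hp with h1 | ⟨h1, -⟩
      · rw [h1]; simp
      · exact hne _ h1

theorem SimRel_foldl (ml : List (String × String × String))
    (d : PySem.Dict String (PySem.Set String))
    (st : PySem.Dict String String × PySem.Set String)
    (h : SimRel d st) : SimRel (ml.foldl stepA d) (ml.foldl stepB st) := by
  induction ml generalizing d st with
  | nil => exact h
  | cons row rest ih => exact ih _ _ (SimRel_step d st row h)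

-- A's second loop over fresh distinct keys writes exactly the collapsed entries
theorem collapse_items (l : List (String × PySem.Set String)) (h : (l.map Prod.fst).Nodup) :
    (l.foldl
      (fun fm p =>
        if PySem.Set.len p.2 == 1 then fm.insert p.1 (p.2.headD "")
        else fm.insert p.1 p.1)
      (PySem.Dict.empty : PySem.Dict String String)).items = l.map cval := by
  have hbody : (fun (fm : PySem.Dict String String) (p : String × PySem.Set String) =>
      if PySem.Set.len p.2 == 1 then fm.insert p.1 (p.2.headD "") else fm.insert p.1 p.1)
      = fun fm p => fm.insert p.1 ((cval p).2) := by
    funext fm p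
    simp only [cval]
    exact (apply_ite (fm.insert p.1) _ _ _).symm
  rw [hbody,
    PySem.Dict.items_foldl_insert_fresh l Prod.fst (fun p => (cval p).2) PySem.Dict.empty
      (fun a _ => rfl) h]
  have he : PySem.Dict.empty.items = ([] : List (String × String)) := rfl
  rw [he, List.nil_append]
  exact List.map_congr_left (fun a _ => rfl)

-- ===== VERDICT (by name: the statement is the Claim_ definition above) =====
theorem build_schema_mapping_spec : Claim_equal_build_schema_mapping := by
  intro ml _
  unfold Spec_build_schema_mapping build_schema_mapping build_schema_mapping_alt
  have h0 : SimRel PySem.Dict.empty (PySem.Dict.empty, PySem.Set.empty) := by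
    refine ⟨?_, ?_, ?_, ?_⟩
    · simp [PySem.Dict.keys, PySem.Dict.empty]
    · rfl
    · intro x
      simp [PySem.Set.contains, PySem.Set.empty, PySem.Dict.getD, PySem.Dict.empty,
        PySem.Dict.get?]
    · intro p hp
      simp [PySem.Dict.empty] at hp
  obtain ⟨hnd, hitems, -, -⟩ := SimRel_foldl ml _ _ h0
  rw [collapse_items _ (by simpa [PySem.Dict.keys] using hnd), hitems]
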